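-- pv_equiv track=rewrite | github.com/PLSE-Lab/Python-MLAPI-expl | python_sources/jackiezhao-titanic-vote-by-xgboost.py | cutFeature
-- ===== SOURCE A (Python) =====
-- def cutFeature(cut_lst,data):
--     cut_group=0
--     for i in range(len(cut_lst)):
--         if data <cut_lst[i]:
--             cut_group=i
--             break
--         if i == len(cut_lst)-1:
--             if data >=cut_lst[i]:
--                 cut_group=i+1
--     return cut_group
-- ===== SOURCE B (Python) =====
-- def cutFeature(cut_lst, data):
--     # scan the cutpoints right-to-left, keeping the leftmost index whose cutpoint exceeds data
--     r = len(cut_lst)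
--     for i in range(len(cut_lst) - 1, -1, -1):
--         if data < cut_lst[i]:
--             r = i
--     return r
-- ===== Notes on version B (the rewrite author's own statement) =====
-- stated objective: alternative
-- what changed: Replaced A's forward scan with break, threaded cut_group state and per-iteration last-index branch by a single backward fold that tracks the leftmost cutpoint exceeding data (default len).
import Mathlib
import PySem

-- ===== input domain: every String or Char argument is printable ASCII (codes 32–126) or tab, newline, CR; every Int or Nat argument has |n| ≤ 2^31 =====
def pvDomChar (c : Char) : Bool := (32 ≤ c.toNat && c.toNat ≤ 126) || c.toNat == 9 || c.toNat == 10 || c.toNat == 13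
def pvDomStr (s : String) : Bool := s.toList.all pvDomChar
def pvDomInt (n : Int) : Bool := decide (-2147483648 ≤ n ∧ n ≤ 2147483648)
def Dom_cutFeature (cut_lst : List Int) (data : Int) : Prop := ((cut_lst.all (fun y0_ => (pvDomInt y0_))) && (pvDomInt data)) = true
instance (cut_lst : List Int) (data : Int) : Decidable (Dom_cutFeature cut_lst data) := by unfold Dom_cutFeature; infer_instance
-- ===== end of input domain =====

-- B replaces A's forward break-scan (with its threaded state and last-index special case) by a
-- backward fold tracking the leftmost cutpoint exceeding data; same O(n) cost, plainer code.

-- ===== PORT A =====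
-- the for-loop with its break, threading cut_group; indices produced by range(len) are always in range, so getD's default is never read
def cutFeatureLoop (cut_lst : List Int) (data : Int) (cut_group : Int) (i : Nat) : Int :=
  if i < cut_lst.length then
    if data < cut_lst.getD i 0 then (i : Int)   -- cut_group = i; break
    else
      let cg := if i = cut_lst.length - 1 then
                  (if data ≥ cut_lst.getD i 0 then (i : Int) + 1 else cut_group)
                else cut_group
      cutFeatureLoop cut_lst data cg (i + 1)
  else cut_group
termination_by cut_lst.length - i

def cutFeature (cut_lst : List Int) (data : Int) : Int :=
  cutFeatureLoop cut_lst data 0 0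

-- ===== PORT B =====
-- the backward for-loop: k is the count of indices still to visit, so it visits i = k-1, …, 0;
-- indices stay in range, so getD's default is never read
def revLoop (cut_lst : List Int) (data : Int) (k : Nat) (r : Int) : Int :=
  match k with
  | 0 => r
  | k + 1 => revLoop cut_lst data k (if data < cut_lst.getD k 0 then (k : Int) else r)

def cutFeature_alt (cut_lst : List Int) (data : Int) : Int :=
  revLoop cut_lst data cut_lst.length (cut_lst.length : Int)

-- ===== PRECONDITION & SPEC =====
def Spec_cutFeature (cut_lst : List Int) (data : Int) (out : Int) : Prop := out = cutFeature_alt cut_lst data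
instance (cut_lst : List Int) (data : Int) (out : Int) : Decidable (Spec_cutFeature cut_lst data out) := by unfold Spec_cutFeature; infer_instance

-- ===== CLAIM (what is proved, stated in full; the proofs are below) =====
def Claim_equal_cutFeature : Prop := ∀ (cut_lst : List Int) (data : Int), Dom_cutFeature cut_lst data → Spec_cutFeature cut_lst data (cutFeature cut_lst data)

-- ===== LEMMAS AND PROOFS =====

-- the common characterisation: first index ≥ i whose cutpoint exceeds data, else the length
def firstFrom (l : List Int) (d : Int) (i : Nat) : Nat :=
  if i < l.length then
    (if d < l.getD i 0 then i else firstFrom l d (i + 1))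
  else i
termination_by l.length - i
decreasing_by omega

theorem firstFrom_end (l : List Int) (d : Int) (i : Nat) (h : ¬ i < l.length) :
    firstFrom l d i = i := by rw [firstFrom]; simp [h]

theorem cutFeatureLoop_eq (l : List Int) (d : Int) :
    ∀ (n i : Nat) (cg : Int), l.length - i = n → i < l.length →
    cutFeatureLoop l d cg i = ((firstFrom l d i : Nat) : Int) := by
  intro n
  induction n using Nat.strong_induction_on with
  | _ n ih =>
    intro i cg hn hi
    rw [cutFeatureLoop, firstFrom]
    simp only [hi, if_true]
    by_cases hd : d < l.getD i 0
    · simp only [hd, if_true]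
    · simp only [hd, if_false]
      by_cases hlast : i = l.length - 1
      · rw [if_pos hlast, if_pos (show d ≥ l.getD i 0 from not_lt.mp hd)]
        rw [cutFeatureLoop, firstFrom]
        simp only [show ¬ (i + 1 < l.length) by omega, if_false]
        push_cast; ring
      · rw [if_neg hlast]
        exact ih (l.length - (i + 1)) (by omega) (i + 1) cg rfl (by omega)

theorem revLoop_eq (l : List Int) (d : Int) :
    ∀ k : Nat, k ≤ l.length →
    revLoop l d k ((firstFrom l d k : Nat) : Int) = ((firstFrom l d 0 : Nat) : Int) := by
  intro k
  induction k with
  | zero => intro _; rfl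
  | succ k ih =>
    intro hk
    rw [revLoop]
    have harg : (if d < l.getD k 0 then (k : Int) else ((firstFrom l d (k + 1) : Nat) : Int))
        = ((firstFrom l d k : Nat) : Int) := by
      conv_rhs => rw [firstFrom]
      simp only [show k < l.length by omega, if_true]
      split <;> simp
    rw [harg]
    exact ih (by omega)

-- ===== VERDICT (by name: the statement is the Claim_ definition above) =====
theorem cutFeature_spec : Claim_equal_cutFeature := by
  intro cut_lst data _
  unfold Spec_cutFeature cutFeature cutFeature_alt
  have hend : ((cut_lst.length : Nat) : Int) = ((firstFrom cut_lst data cut_lst.length : Nat) : Int) := by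
    rw [firstFrom_end cut_lst data cut_lst.length (by omega)]
  by_cases h0 : cut_lst.length = 0
  · rw [cutFeatureLoop, hend, revLoop_eq cut_lst data cut_lst.length le_rfl]
    simp [h0, firstFrom_end cut_lst data 0 (by omega)]
  · rw [cutFeatureLoop_eq cut_lst data cut_lst.length 0 0 rfl (by omega),
      hend, revLoop_eq cut_lst data cut_lst.length le_rfl]
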